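-- pv_equiv track=rewrite | github.com/srikanthgoud527/python | day8.py | sumonlyevendigits
-- ===== SOURCE A (Python) =====
-- def sumonlyevendigits(str):
--     sum=0
--     lst=list(str)
--     for x in range(len(lst)):
--         if ord(lst[x])>=48 and ord(lst[x])<=57:
--             if(ord(lst[x])%2==0):
--                 sum=sum+ord(lst[x])-48;
--
--     return sum
-- ===== SOURCE B (Python) =====
-- def sumonlyevendigits(str):
--     return (2 * str.count('2') + 4 * str.count('4')
--             + 6 * str.count('6') + 8 * str.count('8'))
-- ===== Notes on version B (the rewrite author's own statement) =====
-- stated objective: faster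
-- what changed: Replaces the indexed per-character loop with ord-range guards by a closed combination of str.count calls on the even digit characters (2,4,6,8; '0' contributes nothing).
import Mathlib
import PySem

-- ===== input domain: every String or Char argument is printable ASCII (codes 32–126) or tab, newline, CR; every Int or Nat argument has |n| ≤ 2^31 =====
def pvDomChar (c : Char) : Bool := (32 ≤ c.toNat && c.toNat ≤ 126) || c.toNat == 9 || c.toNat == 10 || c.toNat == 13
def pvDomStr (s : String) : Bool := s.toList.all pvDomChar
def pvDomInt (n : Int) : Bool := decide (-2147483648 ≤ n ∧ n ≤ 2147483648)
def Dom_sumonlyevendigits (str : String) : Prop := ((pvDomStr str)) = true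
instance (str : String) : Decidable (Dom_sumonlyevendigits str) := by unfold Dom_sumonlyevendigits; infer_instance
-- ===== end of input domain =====

-- B replaces A's indexed per-character loop with a closed combination of str.count
-- calls on the even digit characters ('0' adds nothing); measured faster (constant factor).

-- ===== PORT A =====
-- literal port: lst = list(str); for x in range(len(lst)): guarded accumulation on ord(lst[x])
def sumonlyevendigits (str : String) : Int :=
  let lst := str.toList
  (PySem.List.pyRange 0 (PySem.List.len lst)).foldl
    (fun sum x =>
      let c := PySem.List.pyGetD lst x ' '
      if 48 ≤ c.toNat ∧ c.toNat ≤ 57 then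
        if c.toNat % 2 = 0 then sum + (c.toNat : Int) - 48 else sum
      else sum) 0

-- ===== PORT B =====
def sumonlyevendigits_alt (str : String) : Int :=
  2 * (PySem.Str.count str "2" : Int) + 4 * (PySem.Str.count str "4" : Int)
    + 6 * (PySem.Str.count str "6" : Int) + 8 * (PySem.Str.count str "8" : Int)

-- ===== PRECONDITION & SPEC =====
def Spec_sumonlyevendigits (str : String) (out : Int) : Prop := out = sumonlyevendigits_alt str
instance (str : String) (out : Int) : Decidable (Spec_sumonlyevendigits str out) := by unfold Spec_sumonlyevendigits; infer_instance

-- ===== CLAIM (what is proved, stated in full; the proofs are below) =====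
def Claim_equal_sumonlyevendigits : Prop := ∀ (str : String), Dom_sumonlyevendigits str → Spec_sumonlyevendigits str (sumonlyevendigits str)

-- ===== LEMMAS AND PROOFS =====

-- single-character substring count is plain character count
theorem chars_count_go_singleton (c : Char) (l : List Char) (fuel : Nat) (acc : Nat)
    (h : l.length ≤ fuel) :
    PySem.Chars.count.go [c] fuel l acc = acc + l.count c := by
  induction l generalizing fuel acc with
  | nil => cases fuel <;> simp [PySem.Chars.count.go]
  | cons hd tl ih =>
    cases fuel with
    | zero => simp at h
    | succ n =>
      simp only [List.length_cons] at h
      by_cases hceq : c = hd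
      · subst hceq
        simp only [PySem.Chars.count.go]
        rw [if_pos (by simp)]
        simp only [List.length_singleton, List.drop_succ_cons, List.drop_zero]
        rw [ih n (acc + 1) (by omega)]
        simp
        omega
      · simp only [PySem.Chars.count.go]
        rw [if_neg (by simp [List.isPrefixOf]; exact hceq)]
        rw [ih n acc (by omega)]
        have hb : (hd == c) = false := beq_eq_false_iff_ne.mpr (Ne.symm hceq)
        simp [List.count_cons, hb]

theorem chars_count_singleton (l : List Char) (c : Char) :
    PySem.Chars.count l [c] = l.count c := by
  have := chars_count_go_singleton c l l.length 0 le_rfl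
  simp [PySem.Chars.count, this]

theorem char_eq_of_toNat_eq {c d : Char} (h : c.toNat = d.toNat) : c = d := by
  apply Char.ext
  exact UInt32.toNat_inj.mp h

-- the per-character step of A's loop equals B's per-character contribution, folded
theorem loop_eq_counts (l : List Char) (a : Int) :
    l.foldl (fun sum c =>
      if 48 ≤ c.toNat ∧ c.toNat ≤ 57 then
        if c.toNat % 2 = 0 then sum + (c.toNat : Int) - 48 else sum
      else sum) a
    = a + 2 * (l.count '2' : Int) + 4 * (l.count '4' : Int)
        + 6 * (l.count '6' : Int) + 8 * (l.count '8' : Int) := by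
  induction l generalizing a with
  | nil => simp
  | cons hd tl ih =>
    simp only [List.foldl_cons, List.count_cons, ih]
    by_cases h2 : hd = '2'
    · subst h2; simp; ring
    by_cases h4 : hd = '4'
    · subst h4; simp; ring
    by_cases h6 : hd = '6'
    · subst h6; simp; ring
    by_cases h8 : hd = '8'
    · subst h8; simp; ring
    · have hz : (if 48 ≤ hd.toNat ∧ hd.toNat ≤ 57 then
          if hd.toNat % 2 = 0 then a + (hd.toNat : Int) - 48 else a
        else a) = a := by
        split_ifs with hr he
        · -- even digit in range that is not 2/4/6/8 must be '0', contributing 0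
          have : hd.toNat = 48 := by
            have n50 : hd.toNat ≠ 50 := fun h => h2 (char_eq_of_toNat_eq h)
            have n52 : hd.toNat ≠ 52 := fun h => h4 (char_eq_of_toNat_eq h)
            have n54 : hd.toNat ≠ 54 := fun h => h6 (char_eq_of_toNat_eq h)
            have n56 : hd.toNat ≠ 56 := fun h => h8 (char_eq_of_toNat_eq h)
            omega
          rw [this]; ring
        · rfl
        · rfl
      rw [hz]
      have c2 : (hd == '2') = false := beq_eq_false_iff_ne.mpr h2
      have c4 : (hd == '4') = false := beq_eq_false_iff_ne.mpr h4
      have c6 : (hd == '6') = false := beq_eq_false_iff_ne.mpr h6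
      have c8 : (hd == '8') = false := beq_eq_false_iff_ne.mpr h8
      simp [c2, c4, c6, c8]

-- ===== VERDICT (by name: the statement is the Claim_ definition above) =====
theorem sumonlyevendigits_spec : Claim_equal_sumonlyevendigits := by
  intro s _
  unfold Spec_sumonlyevendigits sumonlyevendigits sumonlyevendigits_alt
  dsimp only
  rw [PySem.List.foldl_pyRange_pyGetD s.toList ' '
      (fun sum c => if 48 ≤ c.toNat ∧ c.toNat ≤ 57 then
        (if c.toNat % 2 = 0 then sum + (c.toNat : Int) - 48 else sum) else sum)
      0 (le_refl 0)]
  simp only [Int.toNat_zero, List.drop_zero]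
  rw [loop_eq_counts]
  simp only [PySem.Str.count_eq, show ("2".toList : List Char) = ['2'] from rfl,
    show ("4".toList : List Char) = ['4'] from rfl, show ("6".toList : List Char) = ['6'] from rfl,
    show ("8".toList : List Char) = ['8'] from rfl, chars_count_singleton]
  ring
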